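-- pv_equiv track=rewrite | github.com/chemayush/Geoguide-eYRC-2023 | Final Files/path_planning.py | find_backward_paths
-- ===== SOURCE A (Python) =====
-- arena = [
--     # Row 0 to 11 with obstacles and weights
--     [0, 1, 0, 0, 0, 0, 0, 0, 0, 0, 0, 0],      # 0
--     [1, 0, 3, 1, 0, 0, 0, 0, 0, 0, 0, 0],      # 1
--     [0, 3, 0, 0, 1, 100, 0, 0, 0, 0, 0, 0],    # 2
--     [0, 1, 0, 0, 3, 0, 1, 0, 0, 0, 0, 0],      # 3
--     [0, 0, 1, 3, 0, 3, 0, 1, 0, 0, 0, 0],      # 4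
--     [0, 0, 100, 0, 3, 0, 0, 0, 1, 0, 0, 0],    # 5
--     [0, 0, 0, 1, 0, 0, 0, 3, 0, 1, 0, 0],      # 6
--     [0, 0, 0, 0, 1, 0, 3, 0, 3, 0, 1, 0],      # 7
--     [0, 0, 0, 0, 0, 1, 0, 3, 0, 0, 0, 1],      # 8
--     [0, 0, 0, 0, 0, 0, 1, 0, 0, 0, 3, 12],     # 9
--     [0, 0, 0, 0, 0, 0, 0, 1, 0, 3, 0, 3],      # 10
--     [0, 0, 0, 0, 0, 0, 0, 0, 1, 12, 3, 0],     # 11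
-- ]
--
-- coordinates = [(0, 0), (0, 1), (1, 1), (0, 2), (1, 2), (2, 2), (0, 3), (1, 3), (2, 3), (0, 4), (1, 4), (2, 4)]
--
-- def dfs_paths(graph, start, goal, path=None):
--     """
--     Function Name: dfs_paths
--     Input: graph (2D list), start (int), goal (int), path (list)
--     Output: Generator of ALL paths from start to goal
--     Logic: Performs depth-first search to find all paths from start to goal
--     Example Call: dfs_paths(arena, 0, 11)
--     """
--     if path is None:
--         path = [start]
--     if start == goal:
--         yield path
--     for next_node in range(len(graph[start])):
--         if graph[start][next_node] != 0 and next_node not in path: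
--             yield from dfs_paths(graph, next_node, goal, path + [next_node])
--
-- def calculate_length(path):
--     """
--     Function Name: calculate_length
--     Input: path (list)
--     Output: int
--     Logic: Calculates the total length of the given path
--     Example Call: calculate_length([0, 1, 2])
--     """
--     return sum(arena[path[i]][path[i+1]] for i in range(len(path)-1))
--
-- def calculate_turns(path):
--     """
--     Function Name: calculate_turns
--     Input: path (list)
--     Output: int
--     Logic: Calculates the number of turns in the given path. If the x_curr - x_prev, y_curr - y_prev are not the same as x_next - x_curr, y_next - y_curr, then there exists a turn.
--     Example Call: calculate_turns([0, 1, 2])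
--     """
--     turns = 0
--     for i in range(1, len(path)-1):
--         dx1 = coordinates[path[i]][0] - coordinates[path[i-1]][0]
--         dx2 = coordinates[path[i+1]][0] - coordinates[path[i]][0]
--         dy1 = coordinates[path[i]][1] - coordinates[path[i-1]][1]
--         dy2 = coordinates[path[i+1]][1] - coordinates[path[i]][1]
--         if dx1 != dx2 or dy1 != dy2:
--             turns += 1
--     return turns
--
-- def find_backward_paths(start, goal, path_forward):
--     """
--     Function Name: find_backward_paths
--     Input: start (int), goal (int), path_forward (list)
--     Output: list
--     Logic: Finds an alternate path from start to goal avoiding the second last node in path_forward. i.e. avoiding any u-turns.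
--     Example Call: find_backward_paths(0, 11, [0, 1, 2])
--     """
--     all_paths = list(dfs_paths(arena, start, goal))
--     valid_paths = [path for path in all_paths if path_forward[-2] != path[1]]
--     min_length = min(map(calculate_length, valid_paths))
--     shortest_paths = [path for path in valid_paths if calculate_length(path) == min_length]
--     min_turns = min(map(calculate_turns, shortest_paths))
--     path_backward = [path for path in shortest_paths if calculate_turns(path) == min_turns][0]
--     return path_backward
-- ===== SOURCE B (Python) =====
-- # Alternative implementation: sparse adjacency list, one fused DFS that threads the
-- # best (length, turns) candidate through the recursion with the path length
-- # accumulated incrementally; no list of all paths, no min/filter passes.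
--
-- ADJ = [
--     [(1, 1)],
--     [(0, 1), (2, 3), (3, 1)],
--     [(1, 3), (4, 1), (5, 100)],
--     [(1, 1), (4, 3), (6, 1)],
--     [(2, 1), (3, 3), (5, 3), (7, 1)],
--     [(2, 100), (4, 3), (8, 1)],
--     [(3, 1), (7, 3), (9, 1)],
--     [(4, 1), (6, 3), (8, 3), (10, 1)],
--     [(5, 1), (7, 3), (11, 1)],
--     [(6, 1), (10, 3), (11, 12)],
--     [(7, 1), (9, 3), (11, 3)],
--     [(8, 1), (9, 12), (10, 3)],
-- ]
--
-- XS = [0, 0, 1, 0, 1, 2, 0, 1, 2, 0, 1, 2]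
-- YS = [0, 1, 1, 2, 2, 2, 3, 3, 3, 4, 4, 4]
--
--
-- def _turns(p):
--     t = 0
--     for a, b, c in zip(p, p[1:], p[2:]):
--         if (XS[b] - XS[a], YS[b] - YS[a]) != (XS[c] - XS[b], YS[c] - YS[b]):
--             t += 1
--     return t
--
--
-- def find_backward_paths(start, goal, path_forward):
--     banned = path_forward[-2]
--     best = None  # ((length, turns), path) of the best candidate seen so far
--
--     def search(node, path, length):
--         nonlocal best
--         if node == goal and path[1] != banned:
--             key = (length, _turns(path))
--             if best is None or key < best[0]:
--                 best = (key, path)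
--         for nxt, w in ADJ[node]:
--             if nxt not in path:
--                 search(nxt, path + [nxt], length + w)
--
--     search(start, [start], 0)
--     if best is None:
--         raise ValueError("no valid backward path")
--     return best[1]
-- ===== Notes on version B (the rewrite author's own statement) =====
-- stated objective: alternative
-- what changed: A enumerates every DFS path into a list over the dense weight matrix and then runs four more passes (filter valid, min length, filter, min turns, take [0]); B stores the graph as a sparse adjacency list, fuses the whole selection into one DFS that threads the best (length, turns) candidate through the recursion, accumulates the path length incrementally edge by edge, and computes turns from zipped node triples over separate x/y coordinate arrays.
import Mathlib
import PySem

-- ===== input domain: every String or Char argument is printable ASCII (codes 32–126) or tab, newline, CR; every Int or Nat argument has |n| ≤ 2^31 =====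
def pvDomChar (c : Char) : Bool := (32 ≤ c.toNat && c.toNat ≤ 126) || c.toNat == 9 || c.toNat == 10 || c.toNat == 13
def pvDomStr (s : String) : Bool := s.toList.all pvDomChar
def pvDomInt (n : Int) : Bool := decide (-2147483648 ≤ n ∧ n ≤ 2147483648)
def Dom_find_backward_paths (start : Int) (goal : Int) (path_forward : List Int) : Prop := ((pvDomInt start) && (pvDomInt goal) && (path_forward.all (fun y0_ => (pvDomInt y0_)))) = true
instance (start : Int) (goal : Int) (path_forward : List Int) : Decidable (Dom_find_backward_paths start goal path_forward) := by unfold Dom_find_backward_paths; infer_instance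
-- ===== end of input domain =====

-- B replaces A's dense-matrix DFS enumeration followed by four selection passes with a sparse
-- adjacency list and one fused DFS that threads the best (length, turns) candidate through the
-- recursion, accumulating the path length edge by edge (objective: alternative decomposition;
-- where Pre_ fails, the Python A raises and the Python B raises too).

-- ===== PORT A =====
-- module-level constants of the Python file
def pvArena : List (List Int) :=
  [[0, 1, 0, 0, 0, 0, 0, 0, 0, 0, 0, 0],
   [1, 0, 3, 1, 0, 0, 0, 0, 0, 0, 0, 0],
   [0, 3, 0, 0, 1, 100, 0, 0, 0, 0, 0, 0],
   [0, 1, 0, 0, 3, 0, 1, 0, 0, 0, 0, 0],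
   [0, 0, 1, 3, 0, 3, 0, 1, 0, 0, 0, 0],
   [0, 0, 100, 0, 3, 0, 0, 0, 1, 0, 0, 0],
   [0, 0, 0, 1, 0, 0, 0, 3, 0, 1, 0, 0],
   [0, 0, 0, 0, 1, 0, 3, 0, 3, 0, 1, 0],
   [0, 0, 0, 0, 0, 1, 0, 3, 0, 0, 0, 1],
   [0, 0, 0, 0, 0, 0, 1, 0, 0, 0, 3, 12],
   [0, 0, 0, 0, 0, 0, 0, 1, 0, 3, 0, 3],
   [0, 0, 0, 0, 0, 0, 0, 0, 1, 12, 3, 0]]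

def pvCoordinates : List (Int × Int) :=
  [(0, 0), (0, 1), (1, 1), (0, 2), (1, 2), (2, 2), (0, 3), (1, 3), (2, 3), (0, 4), (1, 4), (2, 4)]

-- dfs_paths, as a list of the yielded paths in generator order; the fuel argument only makes the
-- recursion structural: a dfs path has pairwise-distinct entries drawn from {start} ∪ [0, 12), so
-- its length is at most 13 and fuel 13 is never exhausted on any input Pre_ admits.
def pvDfsPaths : Nat → List (List Int) → Int → Int → List Int → List (List Int)
  | 0, _, _, _, _ => []
  | fuel + 1, graph, start, goal, path =>
    let row := (PySem.List.pyGet? graph start).getD []   -- graph[start]; getD only off Pre_ (IndexError)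
    (if start = goal then [path] else []) ++
    (PySem.List.pyRange 0 (PySem.List.len row) 1).foldl
      (fun acc next_node =>
        if (PySem.List.pyGet? row next_node).getD 0 ≠ 0 ∧ ¬ next_node ∈ path
        then acc ++ pvDfsPaths fuel graph next_node goal (path ++ [next_node])
        else acc) []

-- calculate_length
def pvCalcLength (path : List Int) : Int :=
  ((PySem.List.pyRange 0 (PySem.List.len path - 1) 1).map (fun i =>
      (PySem.List.pyGet?
        ((PySem.List.pyGet? pvArena ((PySem.List.pyGet? path i).getD 0)).getD [])
        ((PySem.List.pyGet? path (i + 1)).getD 0)).getD 0)).sum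

-- calculate_turns
def pvCalcTurns (path : List Int) : Int :=
  (PySem.List.pyRange 1 (PySem.List.len path - 1) 1).foldl
    (fun turns i =>
      let ci  := (PySem.List.pyGet? pvCoordinates ((PySem.List.pyGet? path i).getD 0)).getD (0, 0)
      let cim := (PySem.List.pyGet? pvCoordinates ((PySem.List.pyGet? path (i - 1)).getD 0)).getD (0, 0)
      let cip := (PySem.List.pyGet? pvCoordinates ((PySem.List.pyGet? path (i + 1)).getD 0)).getD (0, 0)
      let dx1 := ci.1 - cim.1
      let dx2 := cip.1 - ci.1
      let dy1 := ci.2 - cim.2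
      let dy2 := cip.2 - ci.2
      if dx1 ≠ dx2 ∨ dy1 ≠ dy2 then turns + 1 else turns) 0

def find_backward_paths (start : Int) (goal : Int) (path_forward : List Int) : List Int :=
  let all_paths := pvDfsPaths 13 pvArena start goal [start]
  let valid_paths := all_paths.filter (fun path =>
      PySem.List.pyGet? path_forward (-2) != PySem.List.pyGet? path 1)
  -- min() of an empty list raises ValueError in Python; the .getD defaults are only off Pre_
  let min_length := (PySem.List.min? (valid_paths.map pvCalcLength) (fun x => x)).getD 0
  let shortest_paths := valid_paths.filter (fun path => pvCalcLength path == min_length)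
  let min_turns := (PySem.List.min? (shortest_paths.map pvCalcTurns) (fun x => x)).getD 0
  ((shortest_paths.filter (fun path => pvCalcTurns path == min_turns)).head?).getD []

-- ===== PORT B =====
-- Source B's module constants: sparse adjacency list (neighbour, weight) and split coordinate arrays
def pvAdjB : List (List (Int × Int)) :=
  [[(1, 1)],
   [(0, 1), (2, 3), (3, 1)],
   [(1, 3), (4, 1), (5, 100)],
   [(1, 1), (4, 3), (6, 1)],
   [(2, 1), (3, 3), (5, 3), (7, 1)],
   [(2, 100), (4, 3), (8, 1)],
   [(3, 1), (7, 3), (9, 1)],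
   [(4, 1), (6, 3), (8, 3), (10, 1)],
   [(5, 1), (7, 3), (11, 1)],
   [(6, 1), (10, 3), (11, 12)],
   [(7, 1), (9, 3), (11, 3)],
   [(8, 1), (9, 12), (10, 3)]]

def pvXs : List Int := [0, 0, 1, 0, 1, 2, 0, 1, 2, 0, 1, 2]
def pvYs : List Int := [0, 1, 1, 2, 2, 2, 3, 3, 3, 4, 4, 4]

-- _turns: zip of consecutive node triples; .getD defaults only off Pre_ (IndexError)
def pvTurnsB (p : List Int) : Int :=
  (p.zip ((PySem.List.slice p (some 1) none).zip (PySem.List.slice p (some 2) none))).foldl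
    (fun t x =>
      if ((PySem.List.pyGet? pvXs x.2.1).getD 0 - (PySem.List.pyGet? pvXs x.1).getD 0,
          (PySem.List.pyGet? pvYs x.2.1).getD 0 - (PySem.List.pyGet? pvYs x.1).getD 0)
        ≠ ((PySem.List.pyGet? pvXs x.2.2).getD 0 - (PySem.List.pyGet? pvXs x.2.1).getD 0,
           (PySem.List.pyGet? pvYs x.2.2).getD 0 - (PySem.List.pyGet? pvYs x.2.1).getD 0)
      then t + 1 else t) 0

-- search: fused DFS threading the best ((length, turns), path) candidate; Python's tuple '<' is
-- lexicographic, written out below; fuel 13 only makes the recursion structural (paths are simple)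
def pvSearchB (goal : Int) (banned : Option Int) :
    Nat → Int → List Int → Int → Option ((Int × Int) × List Int) → Option ((Int × Int) × List Int)
  | 0, _, _, _, best => best
  | fuel + 1, node, path, length, best =>
    let best' :=
      if node = goal ∧ PySem.List.pyGet? path 1 ≠ banned then
        match best with
        | none => some ((length, pvTurnsB path), path)
        | some (bk, bp) =>
          if length < bk.1 ∨ (length = bk.1 ∧ pvTurnsB path < bk.2)
          then some ((length, pvTurnsB path), path)
          else some (bk, bp)
      else best
    ((PySem.List.pyGet? pvAdjB node).getD []).foldl
      (fun bb q =>
        if ¬ q.1 ∈ path then pvSearchB goal banned fuel q.1 (path ++ [q.1]) (length + q.2) bb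
        else bb)
      best'

def find_backward_paths_alt (start : Int) (goal : Int) (path_forward : List Int) : List Int :=
  let banned := PySem.List.pyGet? path_forward (-2)
  match pvSearchB goal banned 13 start [start] 0 none with
  | some (_, p) => p
  | none => []   -- Source B raises ValueError here; Pre_ excludes these inputs

-- ===== PRECONDITION & SPEC =====
-- Pre_ is exactly the set of inputs on which the Python A returns: start a valid (possibly
-- Python-negative) row index, goal an actually reachable node label, start ≠ goal (else the
-- 1-node path makes path[1] raise IndexError), path_forward long enough for path_forward[-2],
-- and at least one valid backward path exists (else min() raises ValueError): some neighbour of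
-- row start differs from path_forward[-2], excluding the one dead-end pair start = 1, goal = 0
-- (node 0's only neighbour is 1) whose unique path [1, 0] is banned when path_forward[-2] = 0.
def Pre_find_backward_paths (start : Int) (goal : Int) (path_forward : List Int) : Prop :=
  -12 ≤ start ∧ start < 12 ∧ 0 ≤ goal ∧ goal < 12 ∧ start ≠ goal ∧ 2 ≤ path_forward.length ∧
  (∃ n ∈ List.range 12,
      (PySem.List.pyGet? ((PySem.List.pyGet? pvArena start).getD []) (n : Int)).getD 0 ≠ 0 ∧
      (n : Int) ≠ (PySem.List.pyGet? path_forward (-2)).getD 13) ∧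
  ¬ (start = 1 ∧ goal = 0 ∧ (PySem.List.pyGet? path_forward (-2)).getD 13 = 0)

instance (start : Int) (goal : Int) (path_forward : List Int) : Decidable (Pre_find_backward_paths start goal path_forward) := by unfold Pre_find_backward_paths; infer_instance

def pvWitness_find_backward_paths : Int × Int × List Int := (0, 11, [5, 2, 9])

def Spec_find_backward_paths (start : Int) (goal : Int) (path_forward : List Int) (out : List Int) : Prop := out = find_backward_paths_alt start goal path_forward
instance (start : Int) (goal : Int) (path_forward : List Int) (out : List Int) : Decidable (Spec_find_backward_paths start goal path_forward out) := by unfold Spec_find_backward_paths; infer_instance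

-- ===== CLAIM (what is proved, stated in full; the proofs are below) =====
def Claim_equal_find_backward_paths : Prop := ∀ (start : Int) (goal : Int) (path_forward : List Int), Dom_find_backward_paths start goal path_forward → Pre_find_backward_paths start goal path_forward → Spec_find_backward_paths start goal path_forward (find_backward_paths start goal path_forward)

-- ===== LEMMAS AND PROOFS =====

-- pyGet? commutes with map (used to relate B's sparse/split constants to A's dense ones)
theorem pvGet_map {α β : Type} (xs : List α) (f : α → β) (i : Int) :
    PySem.List.pyGet? (xs.map f) i = (PySem.List.pyGet? xs i).map f := by
  simp [PySem.List.pyGet?, PySem.List.pyIdx?]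

-- B's coordinate arrays are the two projections of A's coordinate pairs
theorem pvXs_getD (v : Int) :
    (PySem.List.pyGet? pvXs v).getD 0 = ((PySem.List.pyGet? pvCoordinates v).getD (0, 0)).1 := by
  have h : pvXs = pvCoordinates.map Prod.fst := by rfl
  rw [h, pvGet_map]
  cases PySem.List.pyGet? pvCoordinates v <;> rfl

theorem pvYs_getD (v : Int) :
    (PySem.List.pyGet? pvYs v).getD 0 = ((PySem.List.pyGet? pvCoordinates v).getD (0, 0)).2 := by
  have h : pvYs = pvCoordinates.map Prod.snd := by rfl
  rw [h, pvGet_map]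
  cases PySem.List.pyGet? pvCoordinates v <;> rfl

-- B's adjacency rows are the nonzero entries of A's matrix rows
def pvRowPairs (row : List Int) : List (Int × Int) :=
  ((PySem.List.pyRange 0 (PySem.List.len row) 1).map
      (fun j => (j, (PySem.List.pyGet? row j).getD 0))).filter (fun q => q.2 ≠ 0)

theorem pvAdjRow (node : Int) :
    (PySem.List.pyGet? pvAdjB node).getD [] = pvRowPairs ((PySem.List.pyGet? pvArena node).getD []) := by
  have h : pvAdjB = pvArena.map pvRowPairs := by decide
  rw [h, pvGet_map]
  cases PySem.List.pyGet? pvArena node <;> rfl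

-- the triple-zip that B's _turns folds over, as a map over A's index range
theorem pvTriples_eq (p : List Int) :
    p.zip ((p.drop 1).zip (p.drop 2))
      = (PySem.List.pyRange 1 (PySem.List.len p - 1) 1).map (fun i =>
          ((PySem.List.pyGet? p (i - 1)).getD 0,
           ((PySem.List.pyGet? p i).getD 0, (PySem.List.pyGet? p (i + 1)).getD 0))) := by
  apply List.ext_getElem
  · simp [PySem.List.length_pyRange_one, PySem.List.len]
    omega
  · intro k h1 h2
    have hlen : k + 2 < p.length := by
      simp [List.length_zip] at h1; omega
    simp only [List.getElem_zip, List.getElem_drop, List.getElem_map,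
      PySem.List.getElem_pyRange_one]
    rw [show (1 : Int) + (k : Int) + 1 = (((k + 2 : Nat)) : Int) by push_cast; omega,
        show (1 : Int) + (k : Int) - 1 = ((k : Nat) : Int) by omega,
        show (1 : Int) + (k : Int) = (((k + 1 : Nat)) : Int) by push_cast; omega]
    simp only [PySem.List.pyGet?_natCast]
    rw [List.getElem?_eq_getElem (by omega), List.getElem?_eq_getElem (by omega),
        List.getElem?_eq_getElem hlen]
    simp [show 1 + k = k + 1 by omega, show 2 + k = k + 2 by omega]

-- B's _turns equals A's calculate_turns on every list
theorem pvTurnsB_eq (p : List Int) : pvTurnsB p = pvCalcTurns p := by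
  unfold pvTurnsB pvCalcTurns
  have hs1 : PySem.List.slice p (some 1) none = p.drop 1 := by
    rw [show (1 : Int) = ((1 : Nat) : Int) from rfl, PySem.List.slice_from_natCast]
  have hs2 : PySem.List.slice p (some 2) none = p.drop 2 := by
    rw [show (2 : Int) = ((2 : Nat) : Int) from rfl, PySem.List.slice_from_natCast]
  rw [hs1, hs2, pvTriples_eq, List.foldl_map]
  apply PySem.List.foldl_congr_mem
  intro acc i _
  simp only [pvXs_getD, pvYs_getD, ne_eq, Prod.mk.injEq, not_and_or]

-- helper: indexing an appended singleton below the original length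
theorem pvGet_append_left (p : List Int) (j : Int) (i : Int) (h0 : 0 ≤ i) (h : i < (p.length : Int)) :
    PySem.List.pyGet? (p ++ [j]) i = PySem.List.pyGet? p i := by
  rw [PySem.List.pyGet?_of_nonneg (p ++ [j]) h0, PySem.List.pyGet?_of_nonneg p h0]
  exact List.getElem?_append_left (by omega)

-- appending one node adds exactly the weight of the new edge to calculate_length
theorem pvCalcLength_append (p : List Int) (j lst : Int) (hl : p.getLast? = some lst) :
    pvCalcLength (p ++ [j])
      = pvCalcLength p
        + (PySem.List.pyGet? ((PySem.List.pyGet? pvArena lst).getD []) j).getD 0 := by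
  have hne : p ≠ [] := by intro h; rw [h] at hl; simp at hl
  have hm : 1 ≤ p.length := List.length_pos_iff.mpr hne
  have hlst : p.getLast hne = lst := by
    rw [List.getLast?_eq_some_getLast hne] at hl; exact Option.some.inj hl
  unfold pvCalcLength
  rw [show PySem.List.len (p ++ [j]) - 1 = ((p.length : Int) - 1) + 1 by
        simp [PySem.List.len],
      PySem.List.pyRange_one_succ_right (by omega : (0:Int) ≤ (p.length : Int) - 1),
      List.map_append, List.sum_append]
  congr 1
  · rw [show PySem.List.len p - 1 = (p.length : Int) - 1 by simp [PySem.List.len]]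
    congr 1
    apply List.map_congr_left
    intro i hi
    rw [PySem.List.mem_pyRange_one] at hi
    rw [pvGet_append_left p j i hi.1 (by omega),
        pvGet_append_left p j (i + 1) (by omega) (by omega)]
  · have h1 : PySem.List.pyGet? (p ++ [j]) ((p.length : Int) - 1) = some lst := by
      rw [pvGet_append_left p j _ (by omega) (by omega),
          PySem.List.pyGet?_of_nonneg p (by omega),
          show ((p.length : Int) - 1).toNat = p.length - 1 by omega,
          List.getElem?_eq_getElem (by omega), ← List.getLast_eq_getElem hne, hlst]
    simp [h1]

-- the selection step A's four passes amount to: keep the first (length, turns)-lex minimum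
def pvStep (best : Option ((Int × Int) × List Int)) (path : List Int) :
    Option ((Int × Int) × List Int) :=
  match best with
  | none => some ((pvCalcLength path, pvCalcTurns path), path)
  | some ((bl, bt), bp) =>
    if pvCalcLength path < bl ∨ (pvCalcLength path = bl ∧ pvCalcTurns path < bt)
    then some ((pvCalcLength path, pvCalcTurns path), path)
    else some ((bl, bt), bp)

-- pvStep's fold with a some-accumulator, written as plain structural recursion
def pvMinAcc (bl bt : Int) (bp : List Int) : List (List Int) → (Int × Int) × List Int
  | [] => ((bl, bt), bp)
  | x :: xs =>
    if pvCalcLength x < bl ∨ (pvCalcLength x = bl ∧ pvCalcTurns x < bt)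
    then pvMinAcc (pvCalcLength x) (pvCalcTurns x) x xs
    else pvMinAcc bl bt bp xs

theorem pvFoldl_step_some (v : List (List Int)) : ∀ (bl bt : Int) (bp : List Int),
    v.foldl pvStep (some ((bl, bt), bp)) = some (pvMinAcc bl bt bp v) := by
  induction v with
  | nil => intro bl bt bp; rfl
  | cons x xs ih =>
    intro bl bt bp
    simp only [List.foldl_cons, pvStep, pvMinAcc]
    split <;> exact ih _ _ _

theorem pvMinAcc_no_better (v : List (List Int)) : ∀ (bl bt : Int) (bp : List Int),
    (∀ x ∈ v, ¬ (pvCalcLength x < bl ∨ (pvCalcLength x = bl ∧ pvCalcTurns x < bt))) →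
    pvMinAcc bl bt bp v = ((bl, bt), bp) := by
  induction v with
  | nil => intro bl bt bp _; rfl
  | cons x xs ih =>
    intro bl bt bp h
    have hx := h x (by simp)
    simp only [pvMinAcc, if_neg hx]
    exact ih bl bt bp (fun y hy => h y (by simp [hy]))

theorem pvMinAcc_finds (v : List (List Int)) : ∀ (bl bt : Int) (bp : List Int) (K1 K2 : Int) (w : List Int),
    (∀ x ∈ v, ¬ (pvCalcLength x < K1 ∨ (pvCalcLength x = K1 ∧ pvCalcTurns x < K2))) →
    (K1 < bl ∨ (K1 = bl ∧ K2 < bt)) →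
    v.find? (fun x => pvCalcTurns x == K2 && pvCalcLength x == K1) = some w →
    pvMinAcc bl bt bp v = ((K1, K2), w) := by
  induction v with
  | nil => intro _ _ _ _ _ _ _ _ h; simp at h
  | cons a v ih =>
    intro bl bt bp K1 K2 w hmin hlt hfind
    by_cases ha : (pvCalcTurns a == K2 && pvCalcLength a == K1) = true
    · have hw : a = w := by
        rw [List.find?_cons_of_pos (p := fun x => pvCalcTurns x == K2 && pvCalcLength x == K1) ha] at hfind
        exact Option.some.inj hfind
      obtain ⟨h2, h1⟩ : pvCalcTurns a = K2 ∧ pvCalcLength a = K1 := by simpa using ha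
      have hcond : pvCalcLength a < bl ∨ (pvCalcLength a = bl ∧ pvCalcTurns a < bt) := by
        rw [h1, h2]; exact hlt
      simp only [pvMinAcc, h1, h2]
      rw [if_pos hlt, ← hw]
      exact pvMinAcc_no_better v K1 K2 a (fun y hy => hmin y (by simp [hy]))
    · rw [List.find?_cons_of_neg (p := fun x => pvCalcTurns x == K2 && pvCalcLength x == K1) ha] at hfind
      have hamin := hmin a (by simp)
      have hane : ¬ (pvCalcLength a = K1 ∧ pvCalcTurns a = K2) := by
        intro ⟨h1, h2⟩; exact ha (by simp [h1, h2])
      have hKa : K1 < pvCalcLength a ∨ (K1 = pvCalcLength a ∧ K2 < pvCalcTurns a) := by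
        by_cases h1 : pvCalcLength a = K1
        · right
          refine ⟨by omega, ?_⟩
          by_cases h2 : pvCalcTurns a = K2
          · exact absurd ⟨h1, h2⟩ hane
          · omega
        · left; omega
      simp only [pvMinAcc]
      split
      · exact ih _ _ _ _ _ _ (fun y hy => hmin y (by simp [hy])) hKa hfind
      · exact ih _ _ _ _ _ _ (fun y hy => hmin y (by simp [hy])) hlt hfind

-- core selection equivalence, over an arbitrary list of candidate paths
theorem pvSelect_eq (v : List (List Int)) :
    (let min_length := (PySem.List.min? (v.map pvCalcLength) (fun x => x)).getD 0
     let shortest_paths := v.filter (fun path => pvCalcLength path == min_length)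
     let min_turns := (PySem.List.min? (shortest_paths.map pvCalcTurns) (fun x => x)).getD 0
     ((shortest_paths.filter (fun path => pvCalcTurns path == min_turns)).head?).getD [])
    = (match v.foldl pvStep none with
       | some (_, path) => path
       | none => []) := by
  cases v with
  | nil => rfl
  | cons x xs =>
    have hB : (x :: xs).foldl pvStep none
        = some (pvMinAcc (pvCalcLength x) (pvCalcTurns x) x xs) := by
      rw [List.foldl_cons]; exact pvFoldl_step_some xs _ _ _
    rw [hB]
    obtain ⟨m1, hm1⟩ : ∃ m, PySem.List.min? ((x :: xs).map pvCalcLength) (fun x => x) = some m := by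
      cases h : PySem.List.min? ((x :: xs).map pvCalcLength) (fun x => x) with
      | none => simp [PySem.List.min?_eq_none_iff] at h
      | some m => exact ⟨m, rfl⟩
    obtain ⟨x0, hx0v, hfx0⟩ := List.mem_map.mp (PySem.List.min?_mem hm1)
    have hm1min : ∀ y ∈ (x :: xs), m1 ≤ pvCalcLength y := fun y hy =>
      PySem.List.min?_isMin hm1 (pvCalcLength y) (List.mem_map_of_mem hy)
    simp only [hm1, Option.getD_some]
    have hx0S : x0 ∈ (x :: xs).filter (fun path => pvCalcLength path == m1) :=
      List.mem_filter.mpr ⟨hx0v, by simp [hfx0]⟩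
    obtain ⟨m2, hm2⟩ : ∃ m, PySem.List.min?
        (((x :: xs).filter (fun path => pvCalcLength path == m1)).map pvCalcTurns) (fun x => x) = some m := by
      cases h : PySem.List.min? (((x :: xs).filter (fun path => pvCalcLength path == m1)).map pvCalcTurns) (fun x => x) with
      | none =>
        rw [PySem.List.min?_eq_none_iff, List.map_eq_nil_iff] at h
        rw [h] at hx0S; simp at hx0S
      | some m => exact ⟨m, rfl⟩
    obtain ⟨x1, hx1S, hgx1⟩ := List.mem_map.mp (PySem.List.min?_mem hm2)
    have hm2min : ∀ y ∈ (x :: xs).filter (fun path => pvCalcLength path == m1), m2 ≤ pvCalcTurns y := fun y hy =>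
      PySem.List.min?_isMin hm2 (pvCalcTurns y) (List.mem_map_of_mem hy)
    simp only [hm2, Option.getD_some]
    rw [List.filter_filter, List.head?_filter]
    obtain ⟨hx1v, hfx1⟩ : x1 ∈ (x :: xs) ∧ pvCalcLength x1 = m1 := by
      have := List.mem_filter.mp hx1S; exact ⟨this.1, by simpa using this.2⟩
    have hminAll : ∀ y ∈ (x :: xs), ¬ (pvCalcLength y < m1 ∨ (pvCalcLength y = m1 ∧ pvCalcTurns y < m2)) := by
      rintro y hy (h | ⟨h1, h2⟩)
      · exact absurd (hm1min y hy) (by omega)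
      · exact absurd (hm2min y (List.mem_filter.mpr ⟨hy, by simp [h1]⟩)) (by omega)
    have hfindSome : ((x :: xs).find? (fun a => pvCalcTurns a == m2 && pvCalcLength a == m1)).isSome := by
      rw [List.find?_isSome]
      exact ⟨x1, hx1v, by simp [hfx1, hgx1]⟩
    obtain ⟨w, hw⟩ := Option.isSome_iff_exists.mp hfindSome
    rw [hw]
    by_cases hx : (pvCalcTurns x == m2 && pvCalcLength x == m1) = true
    · have hwx : x = w := by
        rw [List.find?_cons_of_pos (p := fun a => pvCalcTurns a == m2 && pvCalcLength a == m1) hx] at hw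
        exact Option.some.inj hw
      obtain ⟨h2, h1⟩ : pvCalcTurns x = m2 ∧ pvCalcLength x = m1 := by simpa using hx
      have hM : pvMinAcc (pvCalcLength x) (pvCalcTurns x) x xs = ((m1, m2), w) := by
        rw [h1, h2, ← hwx]
        exact pvMinAcc_no_better xs m1 m2 x (fun y hy => hminAll y (by simp [hy]))
      rw [hM]
      rfl
    · rw [List.find?_cons_of_neg (p := fun a => pvCalcTurns a == m2 && pvCalcLength a == m1) hx] at hw
      have hxne : ¬ (pvCalcLength x = m1 ∧ pvCalcTurns x = m2) := by
        intro ⟨h1, h2⟩; exact hx (by simp [h1, h2])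
      have hxmin := hminAll x (by simp)
      have hKx : m1 < pvCalcLength x ∨ (m1 = pvCalcLength x ∧ m2 < pvCalcTurns x) := by
        by_cases h1 : pvCalcLength x = m1
        · right
          refine ⟨by omega, ?_⟩
          by_cases h2 : pvCalcTurns x = m2
          · exact absurd ⟨h1, h2⟩ hxne
          · omega
        · left; omega
      have hM : pvMinAcc (pvCalcLength x) (pvCalcTurns x) x xs = ((m1, m2), w) :=
        pvMinAcc_finds xs _ _ _ _ _ _ (fun y hy => hminAll y (by simp [hy])) hKx hw
      rw [hM]
      rfl

-- pvStep guarded by A's validity filter, as a single fold step over the raw dfs list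
def pvStepF (banned : Option Int) (best : Option ((Int × Int) × List Int)) (p : List Int) :
    Option ((Int × Int) × List Int) :=
  if banned != PySem.List.pyGet? p 1 then pvStep best p else best

-- folding g over a list built by 'if c x: acc += F x' is the fused conditional fold
theorem pvFoldl_build {ι β : Type} (L : List ι) (c : ι → Prop) [DecidablePred c]
    (F : ι → List (List Int)) (g : β → List Int → β) :
    ∀ (A : List (List Int)) (b : β),
      (L.foldl (fun acc x => if c x then acc ++ F x else acc) A).foldl g b
      = L.foldl (fun bb x => if c x then (F x).foldl g bb else bb) (A.foldl g b) := by
  induction L with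
  | nil => intro A b; rfl
  | cons x xs ih =>
    intro A b
    simp only [List.foldl_cons]
    by_cases hc : c x
    · rw [if_pos hc, if_pos hc, ih, List.foldl_append]
    · rw [if_neg hc, if_neg hc, ih]

-- B's loop over a sparse row equals A's loop over the dense row with the nonzero test
theorem pvRowFold {β : Type} (row : List Int) (path : List Int) (g : β → Int → Int → β) (b : β) :
    (pvRowPairs row).foldl (fun bb q => if ¬ q.1 ∈ path then g bb q.1 q.2 else bb) b
    = (PySem.List.pyRange 0 (PySem.List.len row) 1).foldl
        (fun bb j => if (PySem.List.pyGet? row j).getD 0 ≠ 0 ∧ ¬ j ∈ path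
                     then g bb j ((PySem.List.pyGet? row j).getD 0) else bb) b := by
  unfold pvRowPairs
  rw [List.foldl_filter, List.foldl_map]
  apply PySem.List.foldl_congr_mem
  intro acc j _
  by_cases h0 : (PySem.List.pyGet? row j).getD 0 ≠ 0 <;> by_cases hp : j ∈ path <;>
    simp [h0, hp]

-- the fused search equals folding the guarded selection step over A's dfs path list
theorem pvSearch_eq (goal : Int) (banned : Option Int) :
    ∀ (fuel : Nat) (node : Int) (path : List Int) (length : Int)
      (best : Option ((Int × Int) × List Int)),
      path.getLast? = some node → length = pvCalcLength path →
      pvSearchB goal banned fuel node path length best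
        = (pvDfsPaths fuel pvArena node goal path).foldl (pvStepF banned) best := by
  intro fuel
  induction fuel with
  | zero => intro node path length best _ _; rfl
  | succ fuel ih =>
    intro node path length best hlast hlen
    simp only [pvSearchB, pvDfsPaths]
    rw [List.foldl_append]
    have hbest' :
        (if node = goal ∧ PySem.List.pyGet? path 1 ≠ banned then
            match best with
            | none => some ((length, pvTurnsB path), path)
            | some (bk, bp) =>
              if length < bk.1 ∨ (length = bk.1 ∧ pvTurnsB path < bk.2)
              then some ((length, pvTurnsB path), path)
              else some (bk, bp)
          else best)
        = (if node = goal then [path] else []).foldl (pvStepF banned) best := by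
      by_cases hg : node = goal
      · rw [if_pos hg]
        simp only [hg, true_and, List.foldl_cons, List.foldl_nil]
        by_cases hb : PySem.List.pyGet? path 1 ≠ banned
        · rw [if_pos hb]
          have : (banned != PySem.List.pyGet? path 1) = true := by
            simp [bne, Ne.symm hb]
          simp only [pvStepF, this, if_pos]
          unfold pvStep
          rw [hlen, pvTurnsB_eq]
          cases best with
          | none => rfl
          | some b =>
            obtain ⟨⟨bl, bt⟩, bp⟩ := b
            rfl
        · rw [if_neg hb]
          have : (banned != PySem.List.pyGet? path 1) = false := by
            simp only [ne_eq, not_not] at hb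
            simp [bne, hb]
          simp [pvStepF, this]
      · rw [if_neg (by tauto), if_neg hg]
        rfl
    rw [hbest', pvAdjRow,
        pvRowFold ((PySem.List.pyGet? pvArena node).getD []) path
          (fun bb j w => pvSearchB goal banned fuel j (path ++ [j]) (length + w) bb)]
    rw [pvFoldl_build _ _ _ _ []]
    simp only [List.foldl_nil]
    apply PySem.List.foldl_congr_mem
    intro acc j _
    by_cases hc : (PySem.List.pyGet? ((PySem.List.pyGet? pvArena node).getD []) j).getD 0 ≠ 0 ∧ ¬ j ∈ path
    · rw [if_pos hc, if_pos hc]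
      rw [ih j (path ++ [j]) _ acc (by simp) ?_]
      rw [pvCalcLength_append path j node hlast, hlen]
    · rw [if_neg hc, if_neg hc]

-- the two ports agree on every input
theorem pvPorts_eq (start goal : Int) (path_forward : List Int) :
    find_backward_paths start goal path_forward = find_backward_paths_alt start goal path_forward := by
  unfold find_backward_paths find_backward_paths_alt
  rw [pvSelect_eq ((pvDfsPaths 13 pvArena start goal [start]).filter
      (fun path => PySem.List.pyGet? path_forward (-2) != PySem.List.pyGet? path 1))]
  rw [List.foldl_filter]
  have h := pvSearch_eq goal (PySem.List.pyGet? path_forward (-2)) 13 start [start] 0 none rfl rfl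
  simp only [h]
  rfl

-- ===== VERDICT (by name: the statement is the Claim_ definition above) =====
theorem find_backward_paths_spec : Claim_equal_find_backward_paths := by
  intro start goal path_forward _ _
  exact pvPorts_eq start goal path_forward
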